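-- pv_equiv track=rewrite | github.com/Terry1lnkyzhang/Recorder | src/ai/suggestions/service.py | _reorder_parameter_names_for_method
-- ===== SOURCE A (Python) =====
-- def _reorder_parameter_names_for_method(method_name: str, ordered_names: list[str]) -> list[str]:
--     priority_names = ["Name", "HelpText", "direction", "scrollable", "cellValue"]
--     reordered = list(ordered_names)
--     for name in reversed(priority_names):
--         reordered = _move_name_to_front(reordered, name)
--     normalized_method = str(method_name or "").strip().lower()
--     if normalized_method == "findcontrolbyname":
--         return reordered
--     if normalized_method == "click":
--         for name in reversed(["absolute", "y", "x", "button"]):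
--             reordered = _move_name_to_front(reordered, name)
--         return reordered
--     return reordered
--
-- def _move_name_to_front(names: list[str], target_name: str) -> list[str]:
--     target_indexes = [index for index, item in enumerate(names) if item == target_name]
--     if not target_indexes:
--         return names
--     target_index = target_indexes[0]
--     if target_index == 0:
--         return names
--     reordered = list(names)
--     target_value = reordered.pop(target_index)
--     reordered.insert(0, target_value)
--     return reordered
-- ===== SOURCE B (Python) =====
-- def _reorder_parameter_names_for_method(method_name: str, ordered_names: list[str]) -> list[str]:
--     priorities = ["Name", "HelpText", "direction", "scrollable", "cellValue"]
--     if str(method_name or "").strip().lower() == "click":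
--         priorities = ["absolute", "y", "x", "button"] + priorities
--     front = [p for p in priorities if p in ordered_names]
--     rest = list(ordered_names)
--     for p in front:
--         rest.remove(p)
--     return front + rest
-- ===== Notes on version B (the rewrite author's own statement) =====
-- stated objective: simpler
-- what changed: Instead of nine successive move-to-front passes (each re-scanning via enumerate, pop and insert), B builds one combined priority list, filters it by membership to get the front block, and removes the first occurrence of each selected name once to get the rest.
import Mathlib
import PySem

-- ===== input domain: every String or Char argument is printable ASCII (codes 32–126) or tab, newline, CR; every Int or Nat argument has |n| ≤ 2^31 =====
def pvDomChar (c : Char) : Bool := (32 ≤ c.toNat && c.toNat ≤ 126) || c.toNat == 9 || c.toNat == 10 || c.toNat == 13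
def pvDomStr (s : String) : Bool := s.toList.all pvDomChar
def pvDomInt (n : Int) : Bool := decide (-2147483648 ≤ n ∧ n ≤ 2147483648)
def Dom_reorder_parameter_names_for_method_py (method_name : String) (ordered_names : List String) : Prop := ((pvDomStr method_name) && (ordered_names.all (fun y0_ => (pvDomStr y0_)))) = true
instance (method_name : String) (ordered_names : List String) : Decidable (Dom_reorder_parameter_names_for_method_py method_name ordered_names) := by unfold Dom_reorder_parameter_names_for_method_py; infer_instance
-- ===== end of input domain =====

-- B replaces A's repeated move-to-front passes by one combined priority list, a membership
-- filter for the front and a single first-occurrence removal per selected name (objective: simpler).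

-- ===== PORT A =====
-- port of _move_name_to_front: first index via the enumerate comprehension, pop + insert at 0.
-- The `none` branch of pop? is unreachable (the index comes from enumerate); returning names there is a totalization.
def pvMoveNameToFront (names : List String) (target_name : String) : List String :=
  let target_indexes := (PySem.List.enumerate names).filterMap
    (fun p => if p.2 == target_name then some p.1 else none)
  match target_indexes with
  | [] => names
  | target_index :: _ =>
    if target_index == 0 then names
    else
      match PySem.List.pop? names target_index with
      | some (target_value, reordered) => PySem.List.insert reordered 0 target_value
      | none => names

def reorder_parameter_names_for_method_py (method_name : String) (ordered_names : List String) : List String :=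
  let priority_names : List String := ["Name", "HelpText", "direction", "scrollable", "cellValue"]
  let reordered := priority_names.reverse.foldl (fun acc name => pvMoveNameToFront acc name) ordered_names
  -- str(method_name or "") is method_name itself for a str argument (the empty string is falsy but unchanged)
  let normalized_method := PySem.Str.lower (PySem.Str.strip method_name)
  if normalized_method == "findcontrolbyname" then reordered
  else if normalized_method == "click" then
    (["absolute", "y", "x", "button"] : List String).reverse.foldl
      (fun acc name => pvMoveNameToFront acc name) reordered
  else reordered

-- ===== PORT B =====
def reorder_parameter_names_for_method_py_alt (method_name : String) (ordered_names : List String) : List String :=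
  let base : List String := ["Name", "HelpText", "direction", "scrollable", "cellValue"]
  let priorities :=
    if PySem.Str.lower (PySem.Str.strip method_name) == "click"
    then ["absolute", "y", "x", "button"] ++ base else base
  let front := priorities.filter (fun p => ordered_names.contains p)
  -- rest.remove(p): p is always a member of rest here; .getD is the unreachable-ValueError totalization
  let rest := front.foldl (fun r p => (PySem.List.remove? r p).getD r) ordered_names
  front ++ rest

-- ===== PRECONDITION & SPEC =====
def Spec_reorder_parameter_names_for_method_py (method_name : String) (ordered_names : List String) (out : List String) : Prop := out = reorder_parameter_names_for_method_py_alt method_name ordered_names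
instance (method_name : String) (ordered_names : List String) (out : List String) : Decidable (Spec_reorder_parameter_names_for_method_py method_name ordered_names out) := by unfold Spec_reorder_parameter_names_for_method_py; infer_instance

-- ===== CLAIM (what is proved, stated in full; the proofs are below) =====
def Claim_equal_reorder_parameter_names_for_method_py : Prop := ∀ (method_name : String) (ordered_names : List String), Dom_reorder_parameter_names_for_method_py method_name ordered_names → Spec_reorder_parameter_names_for_method_py method_name ordered_names (reorder_parameter_names_for_method_py method_name ordered_names)

-- ===== LEMMAS AND PROOFS =====

-- the filtered enumerate comprehension's first element is the first index of the target
theorem pvHeadIdx (names : List String) (t : String) (s : Int) :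
    ((PySem.List.enumerate names s).filterMap
      (fun p => if p.2 == t then some p.1 else none)).head?
      = (PySem.List.index? names t).map (fun k => (s + k : Int)) := by
  induction names generalizing s with
  | nil => simp [PySem.List.enumerate_nil, PySem.List.index?]
  | cons x xs ih =>
    rw [PySem.List.enumerate_cons]
    by_cases hx : x = t
    · subst hx
      rw [PySem.List.index?_cons_self]
      simp
    · rw [PySem.List.index?_cons_of_ne (xs := xs) hx]
      simp only [List.filterMap_cons]
      rw [if_neg (by simpa using hx)]
      rw [ih (s+1)]
      cases PySem.List.index? xs t with
      | none => simp
      | some k => simp; ring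

-- _move_name_to_front in closed form: prepend the target and erase its first occurrence
theorem pvMove_eq (names : List String) (t : String) :
    pvMoveNameToFront names t = if names.contains t then t :: names.erase t else names := by
  have hh := pvHeadIdx names t 0
  unfold pvMoveNameToFront
  cases hidx : (PySem.List.enumerate names 0).filterMap
      (fun p => if p.2 == t then some p.1 else none) with
  | nil =>
    rw [hidx] at hh
    have hnm : t ∉ names := by
      rw [← PySem.List.index?_eq_none_iff (xs := names) (v := t)]
      cases h : PySem.List.index? names t with
      | none => rfl
      | some k => rw [h] at hh; simp at hh
    simp [List.contains_eq_mem, hnm]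
  | cons i rest =>
    rw [hidx] at hh
    obtain ⟨k, hk⟩ : ∃ k, PySem.List.index? names t = some k := by
      cases h : PySem.List.index? names t with
      | none => rw [h] at hh; simp at hh
      | some k => exact ⟨k, rfl⟩
    rw [hk] at hh
    simp at hh
    subst hh
    obtain ⟨pre, suf, hdec, hlen, hpre⟩ := (PySem.List.index?_eq_some_iff names t k).1 hk
    have hmem : t ∈ names := by rw [hdec]; simp
    rw [List.contains_eq_mem, if_pos (by simpa using hmem)]
    by_cases hk0 : k = 0
    · subst hk0
      have : pre = [] := List.eq_nil_of_length_eq_zero hlen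
      subst this
      simp at hdec
      subst hdec
      simp
    · have hif : ((k:Int) == 0) = false := by simpa using fun h => hk0 (by exact_mod_cast h)
      have hklt : k < names.length := by
        rw [hdec]; simp [← hlen]
      have hpop := PySem.List.pop?_natCast (xs := names) (n := k) (h := by simpa [PySem.List.len] using hklt)
      have hget : names[k]'hklt = t := by
        subst hdec hlen
        simp
      have herase : names.eraseIdx k = pre ++ suf := by
        subst hdec hlen
        rw [List.eraseIdx_eq_take_drop_succ]
        simp
      have herase2 : names.erase t = pre ++ suf := by
        subst hdec
        rw [List.erase_append_right _ hpre, List.erase_cons_head _ suf]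
      show (if ((k:Int) == 0) = true then names
            else match PySem.List.pop? names (k:Int) with
              | some (target_value, reordered) => PySem.List.insert reordered 0 target_value
              | none => names) = t :: names.erase t
      rw [hif]
      simp only [Bool.false_eq_true, if_false, hpop, hget, herase, herase2,
        PySem.List.insert_zero]

-- one rest.remove(p) step written with remove?/getD is List.erase
theorem pvRemoveStep (r : List String) (p : String) :
    (PySem.List.remove? r p).getD r = r.erase p := by
  by_cases h : p ∈ r
  · rw [PySem.List.remove?_eq_some_erase _ _ h]; rfl
  · rw [(PySem.List.remove?_eq_none_iff r p).2 h, Option.getD_none, List.erase_of_not_mem h]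

-- erasing each name of ps once preserves membership of a name outside ps …
theorem pvE_mem (ps : List String) (l : List String) (p : String) (hps : p ∉ ps) :
    p ∈ ps.foldl (fun r q => r.erase q) l ↔ p ∈ l := by
  induction ps generalizing l with
  | nil => simp
  | cons q ps ih =>
    simp only [List.mem_cons, not_or] at hps
    rw [List.foldl_cons, ih _ hps.2, List.mem_erase_of_ne hps.1]

-- … and only ever removes elements of l
theorem pvE_subset (ps : List String) (l : List String) :
    ps.foldl (fun r q => r.erase q) l ⊆ l := by
  induction ps generalizing l with
  | nil => simp
  | cons q ps ih => exact fun x hx => List.erase_subset (ih (l.erase q) hx)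

-- a pending erase commutes past the erase fold
theorem pvE_erase_comm (ps : List String) (l : List String) (p : String) :
    (ps.foldl (fun r q => r.erase q) l).erase p = ps.foldl (fun r q => r.erase q) (l.erase p) := by
  induction ps generalizing l with
  | nil => simp
  | cons q ps ih => rw [List.foldl_cons, List.foldl_cons, ih, List.erase_comm]

-- erasing the filtered-out (absent) names is a no-op
theorem pvFoldErase_filter (ps : List String) (l : List String) (hnd : ps.Nodup) :
    (ps.filter (fun p => l.contains p)).foldl (fun r q => r.erase q) l
      = ps.foldl (fun r q => r.erase q) l := by
  induction ps generalizing l with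
  | nil => simp
  | cons q ps ih =>
    obtain ⟨hq, hnd'⟩ := List.nodup_cons.1 hnd
    by_cases hql : q ∈ l
    · rw [List.filter_cons_of_pos (by simpa using hql), List.foldl_cons, List.foldl_cons]
      have hfc : List.filter (fun p => l.contains p) ps
          = List.filter (fun p => (l.erase q).contains p) ps :=
        List.filter_congr (fun p hp => by
          have hne : p ≠ q := fun h => hq (h ▸ hp)
          simp [List.contains_eq_mem, List.mem_erase_of_ne hne])
      rw [hfc]
      exact ih (l.erase q) hnd'
    · rw [List.filter_cons_of_neg (by simpa using hql), List.foldl_cons,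
        List.erase_of_not_mem hql]
      exact ih l hnd'

-- the chain of move-to-fronts = priority filter ++ one first-occurrence erase per present name
theorem pvCore (ps : List String) (hnd : ps.Nodup) (l : List String) :
    ps.foldr (fun t acc => pvMoveNameToFront acc t) l
      = ps.filter (fun p => l.contains p) ++ ps.foldl (fun r q => r.erase q) l := by
  induction ps with
  | nil => simp
  | cons p ps ih =>
    obtain ⟨hp, hnd'⟩ := List.nodup_cons.1 hnd
    rw [List.foldr_cons, ih hnd', pvMove_eq]
    have hpF : p ∉ ps.filter (fun q => l.contains q) := fun h => hp (List.mem_of_mem_filter h)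
    by_cases hpl : p ∈ l
    · have hpE : p ∈ ps.foldl (fun r q => r.erase q) l := (pvE_mem ps l p hp).2 hpl
      have hcond : ((ps.filter (fun q => l.contains q)
          ++ ps.foldl (fun r q => r.erase q) l).contains p) = true := by
        simp only [List.contains_eq_mem, List.mem_append, decide_eq_true_eq]
        exact Or.inr hpE
      rw [hcond, if_pos rfl]
      rw [List.filter_cons_of_pos (by simpa using hpl), List.foldl_cons,
        List.erase_append_right _ hpF, pvE_erase_comm]
      rfl
    · have hpE : p ∉ ps.foldl (fun r q => r.erase q) l := fun h => hpl (pvE_subset ps l h)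
      have hcond : ((ps.filter (fun q => l.contains q)
          ++ ps.foldl (fun r q => r.erase q) l).contains p) = false := by
        simp only [List.contains_eq_mem, List.mem_append, decide_eq_false_iff_not]
        rintro (h | h)
        exacts [hpF (by simpa using h), hpE h]
      rw [hcond]
      simp only [Bool.false_eq_true, if_false]
      rw [List.filter_cons_of_neg (by simpa using hpl), List.foldl_cons,
        List.erase_of_not_mem hpl]

-- the two sides in closed form, for any duplicate-free priority list
theorem pvMain (ps : List String) (hnd : ps.Nodup) (l : List String) :
    ps.reverse.foldl (fun acc t => pvMoveNameToFront acc t) l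
      = ps.filter (fun p => l.contains p)
        ++ (ps.filter (fun p => l.contains p)).foldl (fun r p => (PySem.List.remove? r p).getD r) l := by
  rw [List.foldl_reverse]
  simp only [pvRemoveStep]
  rw [pvFoldErase_filter ps l hnd]
  exact pvCore ps hnd l

-- ===== VERDICT (by name: the statement is the Claim_ definition above) =====
theorem reorder_parameter_names_for_method_py_spec : Claim_equal_reorder_parameter_names_for_method_py := by
  intro method_name l _
  unfold Spec_reorder_parameter_names_for_method_py
  unfold reorder_parameter_names_for_method_py reorder_parameter_names_for_method_py_alt
  cases hc : (PySem.Str.lower (PySem.Str.strip method_name) == "click") with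
  | true =>
    have hf : (PySem.Str.lower (PySem.Str.strip method_name) == "findcontrolbyname") = false := by
      have := eq_of_beq hc
      rw [this]
      decide
    simp only [hc, hf, Bool.false_eq_true, if_false, if_true]
    have h := pvMain (["absolute", "y", "x", "button"] ++
      ["Name", "HelpText", "direction", "scrollable", "cellValue"]) (by decide) l
    rw [List.reverse_append, List.foldl_append] at h
    exact h
  | false =>
    cases hf : (PySem.Str.lower (PySem.Str.strip method_name) == "findcontrolbyname") with
    | true =>
      simp only [hc, hf, Bool.false_eq_true, if_false, if_true]
      exact pvMain ["Name", "HelpText", "direction", "scrollable", "cellValue"] (by decide) l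
    | false =>
      simp only [hc, hf, Bool.false_eq_true, if_false]
      exact pvMain ["Name", "HelpText", "direction", "scrollable", "cellValue"] (by decide) l
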